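-- pv_equiv track=rewrite | github.com/Hasan132002/Vatlley | fix_broken_sections.py | fix_all_colors
-- ===== SOURCE A (Python) =====
-- def fix_all_colors(content, primary, secondary):
--     """Replace all old industry colors with new ones"""
--     old_colors = [
--         '#2980B9', '#2980B9',  # Healthcare
--         '#4A90E2', '#2E5F8D',  # Corporations
--         '#2980B9', '#2980B9', '#2980B9',  # Financial Services
--         '#2980B9', '#8E44AD',  # Government
--         '#3498DB', '#2980B9',  # Insurance
--         '#2C3E50', '#34495E',  # Law Enforcement
--         '#2980B9',  # Collections
--     ]
--
--     # Replace in gradients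
--     for old in old_colors:
--         if old.upper() == primary.upper() or old.upper() == secondary.upper():
--             continue
--         # Replace primary colors
--         content = content.replace(f'linear-gradient(135deg, {old}', f'linear-gradient(135deg, {primary}')
--         # Replace in icon colors
--         content = content.replace(f'color: {old}', f'color: {primary}')
--         content = content.replace(f'background: {old}', f'background: {primary}')
--         # Replace in borders
--         content = content.replace(f'border-left: 4px solid {old}', f'border-left: 4px solid {primary}')
--         content = content.replace(f'border-top: 4px solid {old}', f'border-top: 4px solid {primary}')
--         content = content.replace(f'border-left: 5px solid {old}', f'border-left: 5px solid {primary}')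
--
--     return content
-- ===== SOURCE B (Python) =====
-- # One left-to-right scan over the content with a precomputed replacement table,
-- # instead of A's 14 x 6 sequential full-content .replace passes.
--
-- PREFIXES = ['linear-gradient(135deg, ', 'color: ', 'background: ',
--             'border-left: 4px solid ', 'border-top: 4px solid ', 'border-left: 5px solid ']
-- COLORS = ['#2980B9', '#4A90E2', '#2E5F8D', '#8E44AD', '#3498DB', '#2C3E50', '#34495E']
--
--
-- def fix_all_colors(content, primary, secondary):
--     """Replace all old industry colors with new ones"""
--     table = []
--     for color in COLORS:
--         if color.upper() == primary.upper() or color.upper() == secondary.upper():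
--             continue
--         for pre in PREFIXES:
--             table.append((pre + color, pre + primary))
--     out = []
--     i = 0
--     n = len(content)
--     while i < n:
--         hit = None
--         if content[i] in 'lcb':  # every pattern starts with one of these
--             for pat, rep in table:
--                 if content.startswith(pat, i):
--                     hit = (pat, rep)
--                     break
--         if hit is None:
--             out.append(content[i])
--             i += 1
--         else:
--             out.append(hit[1])
--             i += len(hit[0])
--     return ''.join(out)
-- ===== Notes on version B (the rewrite author's own statement) =====
-- stated objective: alternative
-- what changed: B precomputes the active pattern->replacement table once and performs a single left-to-right scan of the content, emitting a replacement wherever one of the (mutually non-overlapping) patterns matches, instead of A's 14x6 sequential full-content str.replace passes.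
-- outside the precondition, e.g. on fix_all_colors('color: #2980B9#2980B9', '', '#ABCDEF'): A returns 'color: ', B returns 'color: #2980B9'
import Mathlib
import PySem

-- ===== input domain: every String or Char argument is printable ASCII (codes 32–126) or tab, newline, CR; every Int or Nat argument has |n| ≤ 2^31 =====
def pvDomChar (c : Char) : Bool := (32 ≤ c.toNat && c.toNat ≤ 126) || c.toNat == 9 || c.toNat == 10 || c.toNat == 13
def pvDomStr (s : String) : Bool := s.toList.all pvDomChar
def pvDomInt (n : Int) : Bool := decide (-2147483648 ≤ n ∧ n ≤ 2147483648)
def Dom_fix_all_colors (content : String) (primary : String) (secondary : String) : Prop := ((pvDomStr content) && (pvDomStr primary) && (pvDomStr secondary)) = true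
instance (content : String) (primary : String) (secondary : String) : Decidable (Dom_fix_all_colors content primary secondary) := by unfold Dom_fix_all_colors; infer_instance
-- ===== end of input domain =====

-- B replaces A's 14×6 sequential full-content `.replace` passes by one precomputed
-- pattern table and a single left-to-right scan of the content (objective: alternative).

-- ===== PORT A =====
def fix_all_colors (content : String) (primary : String) (secondary : String) : String :=
  let old_colors : List String :=
    ["#2980B9", "#2980B9",
     "#4A90E2", "#2E5F8D",
     "#2980B9", "#2980B9", "#2980B9",
     "#2980B9", "#8E44AD",
     "#3498DB", "#2980B9",
     "#2C3E50", "#34495E",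
     "#2980B9"]
  old_colors.foldl (fun content old =>
    if PySem.Str.upper old = PySem.Str.upper primary ∨ PySem.Str.upper old = PySem.Str.upper secondary then
      content
    else
      let content := PySem.Str.replace content ("linear-gradient(135deg, " ++ old) ("linear-gradient(135deg, " ++ primary)
      let content := PySem.Str.replace content ("color: " ++ old) ("color: " ++ primary)
      let content := PySem.Str.replace content ("background: " ++ old) ("background: " ++ primary)
      let content := PySem.Str.replace content ("border-left: 4px solid " ++ old) ("border-left: 4px solid " ++ primary)
      let content := PySem.Str.replace content ("border-top: 4px solid " ++ old) ("border-top: 4px solid " ++ primary)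
      let content := PySem.Str.replace content ("border-left: 5px solid " ++ old) ("border-left: 5px solid " ++ primary)
      content) content

-- ===== PORT B =====
-- the single left-to-right scan of Source B's while-loop (match a table pattern or copy one char)
def pvScan (table : List (List Char × List Char)) : List Char → List Char
  | [] => []
  | c :: cs =>
    match (if c = 'l' ∨ c = 'c' ∨ c = 'b' then table.find? (fun e => e.1.isPrefixOf (c :: cs)) else none) with
    | none => c :: pvScan table cs
    | some e => e.2 ++ pvScan table (cs.drop (e.1.length - 1))
termination_by s => s.length

def fix_all_colors_alt (content : String) (primary : String) (secondary : String) : String :=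
  let colors : List String := ["#2980B9", "#4A90E2", "#2E5F8D", "#8E44AD", "#3498DB", "#2C3E50", "#34495E"]
  let prefixes : List String := ["linear-gradient(135deg, ", "color: ", "background: ",
                                 "border-left: 4px solid ", "border-top: 4px solid ", "border-left: 5px solid "]
  let table : List (String × String) := colors.foldl (fun table color =>
    if PySem.Str.upper color = PySem.Str.upper primary ∨ PySem.Str.upper color = PySem.Str.upper secondary then
      table
    else
      prefixes.foldl (fun t pre => t ++ [(pre ++ color, pre ++ primary)]) table) []
  String.ofList (pvScan (table.map (fun e => (e.1.toList, e.2.toList))) content.toList)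

-- ===== PRECONDITION & SPEC =====
-- the six pattern prefixes (in A's replacement order) and the seven distinct old colors
def pvPrefC : List (List Char) :=
  ["linear-gradient(135deg, ".toList, "color: ".toList, "background: ".toList,
   "border-left: 4px solid ".toList, "border-top: 4px solid ".toList, "border-left: 5px solid ".toList]
def pvColC : List (List Char) :=
  ["#2980B9".toList, "#4A90E2".toList, "#2E5F8D".toList, "#8E44AD".toList,
   "#3498DB".toList, "#2C3E50".toList, "#34495E".toList]
def pvActive (P S : List Char) (col : List Char) : Bool :=
  !(PySem.Chars.upper col == PySem.Chars.upper P || PySem.Chars.upper col == PySem.Chars.upper S)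

-- `pvNoInterf rep pat`: no occurrence of the pattern `pat` can overlap an inserted
-- replacement `rep` in any context (pat inside rep; suffix of rep = prefix of pat;
-- prefix of rep = proper suffix of pat; rep an internal factor of pat).
def pvNoInterf (rep pat : List Char) : Prop :=
  (¬ pat <:+: rep) ∧
  (∀ m ∈ List.range (rep.length + 1), 0 < m → m ≤ pat.length → rep.drop (rep.length - m) ≠ pat.take m) ∧
  (∀ m ∈ List.range (rep.length + 1), 0 < m → m < pat.length → rep.take m ≠ pat.drop (pat.length - m)) ∧
  (∀ j ∈ List.range pat.length, 0 < j → j + rep.length < pat.length → (pat.drop j).take rep.length ≠ rep)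

-- Pre_ excludes inputs whose `primary` interlocks with the replacement patterns (for
-- instance an empty or truncated-hex `primary`) while `content` actually contains such a
-- pattern: there A's later replace passes can rewrite text produced by its earlier
-- passes — an accident of the sequential order. (Second disjunct: a pattern-free
-- content is claimed for every primary/secondary.)
def Pre_fix_all_colors (content : String) (primary : String) (secondary : String) : Prop :=
  (∀ pre1 ∈ pvPrefC, ∀ pre2 ∈ pvPrefC, ∀ col ∈ pvColC.filter (pvActive primary.toList secondary.toList),
    pvNoInterf (pre1 ++ primary.toList) (pre2 ++ col))
  ∨ (∀ pre ∈ pvPrefC, ∀ col ∈ pvColC, ¬ (pre ++ col) <:+: content.toList)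

instance (content : String) (primary : String) (secondary : String) : Decidable (Pre_fix_all_colors content primary secondary) := by
  unfold Pre_fix_all_colors pvNoInterf; infer_instance

def pvWitness_fix_all_colors : String × String × String := ("color: #2980B9;", "#F00", "#0F0")

def Spec_fix_all_colors (content : String) (primary : String) (secondary : String) (out : String) : Prop := out = fix_all_colors_alt content primary secondary
instance (content : String) (primary : String) (secondary : String) (out : String) : Decidable (Spec_fix_all_colors content primary secondary out) := by unfold Spec_fix_all_colors; infer_instance

-- ===== CLAIM (what is proved, stated in full; the proofs are below) =====
def Claim_equal_fix_all_colors : Prop := ∀ (content : String) (primary : String) (secondary : String), Dom_fix_all_colors content primary secondary → Pre_fix_all_colors content primary secondary → Spec_fix_all_colors content primary secondary (fix_all_colors content primary secondary)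

-- ===== LEMMAS AND PROOFS =====

-- proof-side mirror of Python str.replace (for a nonempty pattern)
def replC (old new : List Char) : List Char → List Char
  | [] => []
  | c :: t => if old.isPrefixOf (c :: t) then new ++ replC old new (t.drop (old.length - 1)) else c :: replC old new t
termination_by s => s.length

theorem go_eq (old new : List Char) (h : old ≠ []) :
    ∀ (fuel : Nat) (l acc : List Char), l.length ≤ fuel →
      PySem.Chars.replace.go old new fuel l acc = acc.reverse ++ replC old new l := by
  intro fuel
  induction fuel with
  | zero =>
    intro l acc hl
    have : l = [] := by cases l <;> simp_all
    subst this
    simp [PySem.Chars.replace.go, replC]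
  | succ n ih =>
    intro l acc hl
    cases l with
    | nil => simp [PySem.Chars.replace.go, replC]
    | cons c t =>
      rw [PySem.Chars.replace.go]
      by_cases hp : old.isPrefixOf (c :: t) = true
      · simp only [hp, if_true]
        have hlen : (List.drop old.length (c :: t)).length ≤ n := by
          simp only [List.length_drop, List.length_cons]
          have h1 : 1 ≤ old.length := by cases old <;> simp_all
          simp only [List.length_cons] at hl
          omega
        rw [ih _ _ hlen]
        have hdrop : List.drop old.length (c :: t) = t.drop (old.length - 1) := by
          cases old with
          | nil => simp_all
          | cons o os => simp
        rw [hdrop]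
        rw [replC]
        simp [hp]
      · simp only [if_neg hp]
        have hlen : t.length ≤ n := by simp only [List.length_cons] at hl; omega
        rw [ih _ _ hlen]
        rw [replC]
        simp [hp]

theorem replC_eq_replace (old new s : List Char) (h : old ≠ []) :
    PySem.Chars.replace s old new = replC old new s := by
  have he : old.isEmpty = false := by cases old <;> simp_all
  rw [PySem.Chars.replace]
  simp [he]
  simpa using go_eq old new h s.length s [] le_rfl

-- concrete facts about the pattern pieces
theorem pref_ne_nil : ∀ pre ∈ pvPrefC, pre ≠ [] := by decide
theorem pref_no_hash : ∀ pre ∈ pvPrefC, '#' ∉ pre := by decide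
theorem pref_head_lcb : ∀ pre ∈ pvPrefC,
    pre.head? = some 'l' ∨ pre.head? = some 'c' ∨ pre.head? = some 'b' := by decide
def pvColChar (c : Char) : Bool :=
  c ∈ ['#','0','1','2','3','4','5','6','7','8','9','A','B','C','D','E','F']
theorem col_len : ∀ col ∈ pvColC, col.length = 7 := by decide
theorem col_head : ∀ col ∈ pvColC, col.head? = some '#' := by decide
theorem col_no_hash_tail : ∀ col ∈ pvColC, '#' ∉ col.tail := by decide
theorem col_chars : ∀ col ∈ pvColC, ∀ ch ∈ col, pvColChar ch := by
  have h : pvColC.all (fun col => col.all pvColChar) = true := by decide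
  simpa [List.all_eq_true] using h
theorem lcb_not_colchar : ¬ pvColChar 'l' ∧ ¬ pvColChar 'c' ∧ ¬ pvColChar 'b' := by decide
theorem pref_not_propsuffix : ∀ p1 ∈ pvPrefC, ∀ p2 ∈ pvPrefC, ∀ j, j < p2.length → 0 < j → p2.drop j ≠ p1 := by decide

-- a pattern's '#' sits exactly at the end of the prefix
theorem prefix_getElem? {α : Type} {l1 l2 : List α} (h : l1 <+: l2) {i : Nat} (hi : i < l1.length) :
    l2[i]? = l1[i]? := by
  obtain ⟨t, rfl⟩ := h
  rw [List.getElem?_append_left hi]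

theorem pat_hash_iff {pre col : List Char} (hp : pre ∈ pvPrefC) (hc : col ∈ pvColC) :
    ∀ i, i < (pre ++ col).length → ((pre ++ col)[i]? = some '#' ↔ i = pre.length) := by
  have hhead := col_head col hc
  have htail := col_no_hash_tail col hc
  obtain ⟨ct, rfl⟩ : ∃ ct, col = '#' :: ct := by
    cases col with
    | nil => simp at hhead
    | cons a t => simp at hhead; exact ⟨t, by rw [hhead]⟩
  intro i hi
  rcases Nat.lt_trichotomy i pre.length with h | h | h
  · rw [List.getElem?_append_left h]
    constructor
    · intro hx
      exfalso
      have hmem : '#' ∈ pre := by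
        obtain ⟨h', he⟩ := List.getElem?_eq_some_iff.mp hx
        rw [← he]
        exact List.getElem_mem h'
      exact pref_no_hash pre hp hmem
    · intro hx; omega
  · subst h
    rw [List.getElem?_append_right (le_refl _)]
    simp
  · have h2 : pre.length ≤ i := by omega
    rw [List.getElem?_append_right h2]
    constructor
    · intro hx
      exfalso
      have hk : i - pre.length ≠ 0 := by omega
      cases hik : i - pre.length with
      | zero => omega
      | succ k =>
        rw [hik] at hx
        simp only [List.getElem?_cons_succ] at hx
        have hmem : '#' ∈ ct := by
          obtain ⟨h', he⟩ := List.getElem?_eq_some_iff.mp hx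
          rw [← he]
          exact List.getElem_mem h'
        simp at htail
        exact htail hmem
    · intro hx; omega

-- distinct patterns never overlap: a pattern matching at 0 and one matching at 0 < j < len
theorem pvNoOverlap {pre1 col1 pre2 col2 : List Char}
    (hp1 : pre1 ∈ pvPrefC) (hc1 : col1 ∈ pvColC) (hp2 : pre2 ∈ pvPrefC) (hc2 : col2 ∈ pvColC)
    {s : List Char} {j : Nat} (hj0 : 0 < j) (hjq : j < (pre1 ++ col1).length)
    (hq : (pre1 ++ col1) <+: s) (hp : (pre2 ++ col2) <+: s.drop j) : False := by
  have hql : (pre1 ++ col1).length = pre1.length + 7 := by simp [col_len col1 hc1]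
  have hpl : (pre2 ++ col2).length = pre2.length + 7 := by simp [col_len col2 hc2]
  have hpre1 : 0 < pre1.length := List.length_pos_of_ne_nil (pref_ne_nil pre1 hp1)
  have hpre2 : 0 < pre2.length := List.length_pos_of_ne_nil (pref_ne_nil pre2 hp2)
  have hag : ∀ i, i < (pre2 ++ col2).length → j + i < (pre1 ++ col1).length →
      (pre2 ++ col2)[i]? = (pre1 ++ col1)[j + i]? := by
    intro i hip hiq
    have h1 : (pre2 ++ col2)[i]? = (s.drop j)[i]? := (prefix_getElem? hp hip).symm
    have h2 : (s.drop j)[i]? = s[j + i]? := by rw [List.getElem?_drop]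
    have h3 : s[j + i]? = (pre1 ++ col1)[j + i]? := prefix_getElem? hq hiq
    rw [h1, h2, h3]
  rcases le_or_gt (pre2 ++ col2).length ((pre1 ++ col1).length - j) with hcase | hcase
  · -- p lies entirely inside q
    have hpH : (pre2 ++ col2)[pre2.length]? = some '#' :=
      (pat_hash_iff hp2 hc2 pre2.length (by omega)).mpr rfl
    have hqH : (pre1 ++ col1)[j + pre2.length]? = some '#' := by
      rw [← hag pre2.length (by omega) (by omega)]; exact hpH
    have hj2 : j + pre2.length = pre1.length :=
      (pat_hash_iff hp1 hc1 (j + pre2.length) (by omega)).mp hqH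
    have hpre : pre2 = pre1.drop j := by
      apply List.ext_getElem?
      intro i
      rcases lt_or_ge i pre2.length with hi | hi
      · have e1 : pre2[i]? = (pre2 ++ col2)[i]? := (List.getElem?_append_left hi).symm
        have e2 : (pre2 ++ col2)[i]? = (pre1 ++ col1)[j + i]? := hag i (by omega) (by omega)
        have e3 : (pre1 ++ col1)[j + i]? = pre1[j + i]? := List.getElem?_append_left (by omega)
        have e4 : (pre1.drop j)[i]? = pre1[j + i]? := by rw [List.getElem?_drop]
        rw [e1, e2, e3, ← e4]
      · rw [List.getElem?_eq_none (by omega), List.getElem?_eq_none (by simp; omega)]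
    exact pref_not_propsuffix pre2 hp2 pre1 hp1 j (by omega) hj0 hpre.symm
  · rcases le_or_gt ((pre1 ++ col1).length - j) 7 with hm7 | hm7
    · -- the overlap is inside q's color: its first char collides with p's head
      have e0 : (pre2 ++ col2)[0]? = (pre1 ++ col1)[j]? := by
        have := hag 0 (by omega) (by omega)
        simpa using this
      have hqj : ∃ ch, (pre1 ++ col1)[j]? = some ch ∧ pvColChar ch := by
        have hj1 : pre1.length ≤ j := by omega
        rw [List.getElem?_append_right hj1]
        have hlt : j - pre1.length < col1.length := by
          rw [col_len col1 hc1]; omega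
        refine ⟨col1[j - pre1.length], ?_, ?_⟩
        · rw [List.getElem?_eq_getElem hlt]
        · exact col_chars col1 hc1 _ (List.getElem_mem hlt)
      have hp0 : (pre2 ++ col2)[0]? = pre2.head? := by
        cases pre2 with
        | nil => simp at hpre2
        | cons a t => simp
      obtain ⟨ch, hch, hcc⟩ := hqj
      have hh := pref_head_lcb pre2 hp2
      rw [hp0] at e0
      rw [← e0] at hch
      rcases hh with hh | hh | hh <;>
        · rw [hh] at hch
          have hce : ch = 'l' ∨ ch = 'c' ∨ ch = 'b' := by
            simp at hch
            first
              | exact Or.inl hch.symm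
              | exact Or.inr (Or.inl hch.symm)
              | exact Or.inr (Or.inr hch.symm)
          rcases lcb_not_colchar with ⟨n1, n2, n3⟩
          rcases hce with rfl | rfl | rfl <;> simp_all [pvColChar]
    · -- the window contains q's '#', forcing p to end exactly at q's end
      have hqH : (pre1 ++ col1)[j + ((pre1 ++ col1).length - j - 7)]? = some '#' := by
        have he : j + ((pre1 ++ col1).length - j - 7) = pre1.length := by omega
        rw [he]
        exact (pat_hash_iff hp1 hc1 pre1.length (by omega)).mpr rfl
      have hpH : (pre2 ++ col2)[(pre1 ++ col1).length - j - 7]? = some '#' := by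
        rw [hag ((pre1 ++ col1).length - j - 7) (by omega) (by omega)]; exact hqH
      have := (pat_hash_iff hp2 hc2 ((pre1 ++ col1).length - j - 7) (by omega)).mp hpH
      omega

-- no pattern is a prefix of a different pattern
theorem pat_prefix_eq {pre1 col1 pre2 col2 : List Char}
    (hp1 : pre1 ∈ pvPrefC) (hc1 : col1 ∈ pvColC) (hp2 : pre2 ∈ pvPrefC) (hc2 : col2 ∈ pvColC)
    (h : (pre2 ++ col2) <+: (pre1 ++ col1)) : pre2 = pre1 ∧ col2 = col1 := by
  have hql : (pre1 ++ col1).length = pre1.length + 7 := by simp [col_len col1 hc1]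
  have hpl : (pre2 ++ col2).length = pre2.length + 7 := by simp [col_len col2 hc2]
  have hle : (pre2 ++ col2).length ≤ (pre1 ++ col1).length := h.length_le
  have hpH : (pre2 ++ col2)[pre2.length]? = some '#' :=
    (pat_hash_iff hp2 hc2 pre2.length (by omega)).mpr rfl
  have hqH : (pre1 ++ col1)[pre2.length]? = some '#' := by
    rw [prefix_getElem? h (by omega)]; exact hpH
  have hlen : pre2.length = pre1.length :=
    (pat_hash_iff hp1 hc1 pre2.length (by omega)).mp hqH
  have heq : pre2 ++ col2 = pre1 ++ col1 := List.IsPrefix.eq_of_length h (by omega)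
  exact ⟨List.append_inj_left heq (by omega), List.append_inj_right heq (by omega)⟩

-- table entries
def pvEnt (P : List Char) (e : List Char × List Char) : Prop :=
  ∃ pre ∈ pvPrefC, ∃ col ∈ pvColC, e = (pre ++ col, pre ++ P)

theorem pvMatch_unique {P : List Char} {s : List Char} {e1 e2 : List Char × List Char}
    (h1 : pvEnt P e1) (h2 : pvEnt P e2) (m1 : e1.1 <+: s) (m2 : e2.1 <+: s) : e1 = e2 := by
  obtain ⟨pre1, hp1, col1, hc1, rfl⟩ := h1
  obtain ⟨pre2, hp2, col2, hc2, rfl⟩ := h2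
  simp only at m1 m2
  rcases le_or_gt (pre1 ++ col1).length (pre2 ++ col2).length with hle | hle
  · have hpp : (pre1 ++ col1) <+: (pre2 ++ col2) := List.prefix_of_prefix_length_le m1 m2 hle
    obtain ⟨h1, h2⟩ := pat_prefix_eq hp2 hc2 hp1 hc1 hpp
    rw [h1, h2]
  · have hpp : (pre2 ++ col2) <+: (pre1 ++ col1) := List.prefix_of_prefix_length_le m2 m1 (by omega)
    obtain ⟨h1, h2⟩ := pat_prefix_eq hp1 hc1 hp2 hc2 hpp
    rw [h1, h2]

theorem pvFind_eq {P : List Char} {s : List Char} {T1 T2 : List (List Char × List Char)}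
    (w1 : ∀ e ∈ T1, pvEnt P e) (w2 : ∀ e ∈ T2, pvEnt P e) (hmem : ∀ e, e ∈ T1 ↔ e ∈ T2) :
    T1.find? (fun e => e.1.isPrefixOf s) = T2.find? (fun e => e.1.isPrefixOf s) := by
  cases hf1 : T1.find? (fun e => e.1.isPrefixOf s) with
  | none =>
    have hnone := List.find?_eq_none.mp hf1
    symm
    apply List.find?_eq_none.mpr
    intro e he
    exact hnone e ((hmem e).mpr he)
  | some e =>
    have hmem1 : e ∈ T1 := List.mem_of_find?_eq_some hf1
    have hpe : e.1.isPrefixOf s = true := by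
      have := List.find?_some (p := fun (e : List Char × List Char) => e.1.isPrefixOf s) hf1
      simpa using this
    have hsome : (T2.find? (fun e => e.1.isPrefixOf s)).isSome := by
      apply List.find?_isSome.mpr
      exact ⟨e, (hmem e).mp hmem1, hpe⟩
    cases hf2 : T2.find? (fun e => e.1.isPrefixOf s) with
    | none => rw [hf2] at hsome; simp at hsome
    | some e' =>
      have hmem2 : e' ∈ T2 := List.mem_of_find?_eq_some hf2
      have hpe' : e'.1.isPrefixOf s = true := by
        have := List.find?_some (p := fun (e : List Char × List Char) => e.1.isPrefixOf s) hf2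
        simpa using this
      have : e = e' := pvMatch_unique (w1 e hmem1) (w2 e' hmem2)
        (List.isPrefixOf_iff_prefix.mp hpe) (List.isPrefixOf_iff_prefix.mp hpe')
      rw [this]

-- a pattern-free prefix passes through replC unchanged
theorem replC_skip {p r : List Char} : ∀ (k : Nat) (s : List Char), k ≤ s.length →
    (∀ j, j < k → ¬ p <+: s.drop j) → replC p r s = s.take k ++ replC p r (s.drop k) := by
  intro k
  induction k with
  | zero => intro s _ _; simp
  | succ n ih =>
    intro s hk hocc
    cases s with
    | nil => simp at hk
    | cons c t =>
      rw [replC]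
      have hnp : ¬ p.isPrefixOf (c :: t) = true := by
        intro hx
        exact hocc 0 (by omega) (by simpa using List.isPrefixOf_iff_prefix.mp hx)
      rw [if_neg hnp]
      have := ih t (by simp at hk; omega) (fun j hj => by
        have := hocc (j + 1) (by omega)
        simpa using this)
      rw [this]
      simp

-- a (proper, nonempty-offset) pattern suffix appearing at the head of replC output was already there
theorem pvSufNoNew {p r q : List Char} (hni : pvNoInterf r q) :
    ∀ (s : List Char) (d : Nat), 0 < d → d < q.length →
      q.drop d <+: replC p r s → q.drop d <+: s := by
  obtain ⟨_, _, hni3, hni4⟩ := hni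
  intro s
  induction hn : s.length using Nat.strong_induction_on generalizing s with
  | _ n ih =>
    cases s with
    | nil =>
      intro d hd0 hdq hpre
      rw [replC] at hpre
      exact hpre
    | cons c cs =>
      intro d hd0 hdq hpre
      rw [replC] at hpre
      by_cases hp : p.isPrefixOf (c :: cs) = true
      · rw [if_pos hp] at hpre
        exfalso
        have hlen : (q.drop d).length = q.length - d := by simp
        rcases le_or_gt (q.length - d) r.length with hle | hle
        · have hqd : q.drop d <+: r :=
            List.prefix_of_prefix_length_le hpre (List.prefix_append r _) (by omega)
          have hne := hni3 (q.length - d) (List.mem_range.mpr (by omega)) (by omega) (by omega)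
          apply hne
          have he : q.drop d = r.take (q.length - d) := by
            have := List.prefix_iff_eq_take.mp hqd
            rw [hlen] at this
            exact this
          rw [← he]
          congr 1
          omega
        · have hrq : r <+: q.drop d :=
            List.prefix_of_prefix_length_le (List.prefix_append r _) hpre (by omega)
          have hne := hni4 d (List.mem_range.mpr hdq) hd0 (by omega)
          apply hne
          exact (List.prefix_iff_eq_take.mp hrq).symm
      · rw [if_neg hp] at hpre
        have hq_drop : q.drop d = q[d] :: q.drop (d + 1) := List.drop_eq_getElem_cons hdq
        rw [hq_drop] at hpre ⊢
        rw [List.cons_prefix_cons] at hpre ⊢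
        obtain ⟨hc, htl⟩ := hpre
        refine ⟨hc, ?_⟩
        by_cases hd1 : d + 1 < q.length
        · exact ih cs.length (by rw [← hn]; simp) cs rfl (d + 1) (by omega) hd1 htl
        · have hnil : q.drop (d + 1) = [] := List.drop_eq_nil_of_le (by omega)
          rw [hnil]
          exact List.nil_prefix

-- matching a pattern at the head commutes with an inner replC (the head char is original)
theorem pvMatch_iff {pp pc qp qc r : List Char}
    (hpp : pp ∈ pvPrefC) (hpc : pc ∈ pvColC) (hqp : qp ∈ pvPrefC) (hqc : qc ∈ pvColC)
    (hni : pvNoInterf r (qp ++ qc)) {c : Char} {cs : List Char} :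
    (qp ++ qc) <+: (c :: replC (pp ++ pc) r cs) ↔ (qp ++ qc) <+: (c :: cs) := by
  have hqlen : 0 < (qp ++ qc).length := by
    simp [col_len qc hqc]
  have hq0 : qp ++ qc = (qp ++ qc)[0] :: (qp ++ qc).drop 1 := by
    have := List.drop_eq_getElem_cons (l := qp ++ qc) hqlen
    simpa using this
  constructor
  · intro h
    rw [hq0] at h ⊢
    rw [List.cons_prefix_cons] at h ⊢
    obtain ⟨h1, h2⟩ := h
    refine ⟨h1, ?_⟩
    by_cases hlen1 : 1 < (qp ++ qc).length
    · exact pvSufNoNew hni cs 1 one_pos hlen1 h2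
    · have hnil : (qp ++ qc).drop 1 = [] := List.drop_eq_nil_of_le (by omega)
      rw [hnil]
      exact List.nil_prefix
  · intro h
    have hfull := h
    rw [hq0] at h ⊢
    rw [List.cons_prefix_cons] at h ⊢
    obtain ⟨h1, h2⟩ := h
    refine ⟨h1, ?_⟩
    have hkcs : (qp ++ qc).length - 1 ≤ cs.length := by
      have hl := h2.length_le
      rw [List.length_drop] at hl
      exact hl
    have hocc : ∀ j, j < (qp ++ qc).length - 1 → ¬ (pp ++ pc) <+: cs.drop j := by
      intro j hj hx
      have hdrop : cs.drop j = (c :: cs).drop (j + 1) := by simp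
      rw [hdrop] at hx
      exact pvNoOverlap hqp hqc hpp hpc (j := j + 1) (by omega) (by omega) hfull hx
    rw [replC_skip ((qp ++ qc).length - 1) cs hkcs hocc]
    have he : (qp ++ qc).drop 1 = cs.take ((qp ++ qc).length - 1) := by
      have := List.prefix_iff_eq_take.mp h2
      simpa using this
    rw [he]
    exact List.prefix_append _ _

-- an inserted replacement passes through the scanner unscathed
theorem pvScan_inert {r t : List Char} {T : List (List Char × List Char)}
    (hni : ∀ e ∈ T, pvNoInterf r e.1) :
    ∀ r'', r'' <:+ r → pvScan T (r'' ++ t) = r'' ++ pvScan T t := by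
  intro r''
  induction r'' with
  | nil => simp
  | cons c r2 ih =>
    intro hsuf
    have hsuf2 : r2 <:+ r := (List.suffix_cons c r2).trans hsuf
    have hnomatch : ∀ e ∈ T, ¬ ((e : List Char × List Char).1.isPrefixOf ((c :: r2) ++ t) = true) := by
      intro e he hx
      have hpre : e.1 <+: (c :: r2) ++ t := List.isPrefixOf_iff_prefix.mp hx
      obtain ⟨hni1, hni2, -, -⟩ := hni e he
      rcases le_or_gt e.1.length (c :: r2).length with hle | hle
      · have hp2 : e.1 <+: (c :: r2) := List.prefix_of_prefix_length_le hpre (List.prefix_append _ _) hle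
        exact hni1 (hp2.isInfix.trans hsuf.isInfix)
      · have hp2 : (c :: r2) <+: e.1 := List.prefix_of_prefix_length_le (List.prefix_append _ _) hpre (by omega)
        have hm : (c :: r2).length ≤ r.length := hsuf.length_le
        have hne := hni2 (c :: r2).length (List.mem_range.mpr (by omega)) (by simp) (by omega)
        apply hne
        have e1 : r.drop (r.length - (c :: r2).length) = c :: r2 := (List.suffix_iff_eq_drop.mp hsuf).symm
        have e2 : e.1.take (c :: r2).length = c :: r2 := (List.prefix_iff_eq_take.mp hp2).symm
        rw [e1, e2]
    have hfind : (if c = 'l' ∨ c = 'c' ∨ c = 'b' then T.find? (fun e => e.1.isPrefixOf (c :: (r2 ++ t))) else none) = none := by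
      split
      · apply List.find?_eq_none.mpr
        intro e he
        have := hnomatch e he
        simpa using this
      · rfl
    rw [List.cons_append, pvScan, hfind]
    rw [ih hsuf2]
    simp

-- no library lemma for find? congruence on a pointwise-equal predicate; proved here
theorem find?_congr' {α : Type} {l : List α} {p q : α → Bool} (h : ∀ a ∈ l, p a = q a) :
    l.find? p = l.find? q := by
  induction l with
  | nil => rfl
  | cons a t ih =>
    rw [List.find?_cons, List.find?_cons, h a List.mem_cons_self]
    split
    · rfl
    · exact ih fun b hb => h b (List.mem_cons_of_mem a hb)

-- KEY: one replC pass then scanning = scanning with the pair added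
theorem pvKey2 {P : List Char} (p r : List Char) (T : List (List Char × List Char))
    (hent : pvEnt P (p, r)) (w : ∀ e ∈ T, pvEnt P e)
    (hniT : ∀ e ∈ T, pvNoInterf r e.1) :
    ∀ s, pvScan T (replC p r s) = pvScan ((p, r) :: T) s := by
  obtain ⟨pp, hpp, pc, hpc, hpe⟩ := hent
  have hpeq : p = pp ++ pc := by simpa using congrArg Prod.fst hpe
  have hppne : 0 < pp.length := List.length_pos_of_ne_nil (pref_ne_nil pp hpp)
  have hplen : p.length = pp.length + 7 := by rw [hpeq]; simp [col_len pc hpc]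
  intro s
  induction hn : s.length using Nat.strong_induction_on generalizing s with
  | _ n ih =>
  cases s with
  | nil =>
    rw [replC]
    simp [pvScan]
  | cons c cs =>
    by_cases hp : p.isPrefixOf (c :: cs) = true
    · -- p matches at the head: both sides emit r and continue after the match
      have hppre : p <+: (c :: cs) := List.isPrefixOf_iff_prefix.mp hp
      have hc : c = 'l' ∨ c = 'c' ∨ c = 'b' := by
        have h0 : p[0]? = some c := by
          have hgp := prefix_getElem? hppre (i := 0) (by omega)
          simp at hgp
          exact hgp.symm
        have h1 : p[0]? = pp.head? := by
          rw [hpeq]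
          cases pp with
          | nil => simp at hppne
          | cons a t => simp
        have := pref_head_lcb pp hpp
        rw [h1] at h0
        rcases this with hh | hh | hh <;>
          · rw [hh] at h0
            injection h0 with h0
            subst h0
            simp
      rw [replC, if_pos hp]
      rw [pvScan_inert hniT r (List.suffix_refl r)]
      rw [ih (cs.drop (p.length - 1)).length (by rw [← hn]; simp) _ rfl]
      -- unfold the RHS: the head entry matches first
      have hfind : (if c = 'l' ∨ c = 'c' ∨ c = 'b'
          then ((p, r) :: T).find? (fun e => e.1.isPrefixOf (c :: cs)) else none) = some (p, r) := by
        rw [if_pos hc, List.find?_cons]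
        simp [hp]
      rw [pvScan, hfind]
    · -- p does not match at the head: the two scans see the same head match
      rw [replC, if_neg hp]
      have hiff : ∀ e ∈ T, (e.1.isPrefixOf (c :: replC p r cs)) = (e.1.isPrefixOf (c :: cs)) := by
        intro e he
        obtain ⟨qp, hqp, qc, hqc, he'⟩ := w e he
        have hq1 : e.1 = qp ++ qc := by simpa using congrArg Prod.fst he'
        have hni := hniT e he
        rw [hq1] at hni ⊢
        apply Bool.coe_iff_coe.mp
        rw [List.isPrefixOf_iff_prefix, List.isPrefixOf_iff_prefix, hpeq]
        exact pvMatch_iff hpp hpc hqp hqc hni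
      have hfind_eq : T.find? (fun e => e.1.isPrefixOf (c :: replC p r cs))
            = T.find? (fun e => e.1.isPrefixOf (c :: cs)) :=
        find?_congr' fun e he => hiff e he
      by_cases hg : c = 'l' ∨ c = 'c' ∨ c = 'b'
      · cases hf : T.find? (fun e => e.1.isPrefixOf (c :: cs)) with
        | none =>
          have hL : (if c = 'l' ∨ c = 'c' ∨ c = 'b'
              then T.find? (fun e => e.1.isPrefixOf (c :: replC p r cs)) else none) = none := by
            rw [if_pos hg, hfind_eq, hf]
          have hR : (if c = 'l' ∨ c = 'c' ∨ c = 'b'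
              then ((p, r) :: T).find? (fun e => e.1.isPrefixOf (c :: cs)) else none) = none := by
            rw [if_pos hg, List.find?_cons]
            split
            · simp_all
            · rw [hf]
          rw [pvScan, hL, pvScan, hR]
          dsimp only
          rw [ih cs.length (by rw [← hn]; simp) cs rfl]
        | some e =>
          have he : e ∈ T := List.mem_of_find?_eq_some hf
          have hqpre : e.1 <+: (c :: cs) := by
            have := List.find?_some (p := fun (e : List Char × List Char) => e.1.isPrefixOf (c :: cs)) hf
            simp only at this
            exact List.isPrefixOf_iff_prefix.mp this
          obtain ⟨qp, hqp, qc, hqc, he'⟩ := w e he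
          have hq1 : e.1 = qp ++ qc := by simpa using congrArg Prod.fst he'
          have hqlen1 : 1 ≤ e.1.length := by
            rw [hq1]
            simp [col_len qc hqc]
          have hqlencs : e.1.length - 1 ≤ cs.length := by
            have := hqpre.length_le
            simp at this
            omega
          have hocc : ∀ j, j < e.1.length - 1 → ¬ p <+: cs.drop j := by
            intro j hj hx
            have hdrop : cs.drop j = (c :: cs).drop (j + 1) := by simp
            rw [hdrop] at hx
            rw [hpeq] at hx
            rw [hq1] at hqpre
            exact pvNoOverlap hqp hqc hpp hpc (j := j + 1) (by omega)
              (by rw [← hq1]; omega) hqpre hx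
          have hsplit : replC p r cs
              = cs.take (e.1.length - 1) ++ replC p r (cs.drop (e.1.length - 1)) :=
            replC_skip (e.1.length - 1) cs hqlencs hocc
          have hdrop_eq : (replC p r cs).drop (e.1.length - 1) = replC p r (cs.drop (e.1.length - 1)) := by
            rw [hsplit]
            set u := cs.take (e.1.length - 1) with hu
            set v := replC p r (cs.drop (e.1.length - 1)) with hv
            have hlen_u : u.length = e.1.length - 1 := by
              rw [hu]
              simp
              omega
            rw [← hlen_u, List.drop_left]
          have hL : (if c = 'l' ∨ c = 'c' ∨ c = 'b'
              then T.find? (fun e => e.1.isPrefixOf (c :: replC p r cs)) else none) = some e := by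
            rw [if_pos hg, hfind_eq, hf]
          have hR : (if c = 'l' ∨ c = 'c' ∨ c = 'b'
              then ((p, r) :: T).find? (fun e => e.1.isPrefixOf (c :: cs)) else none) = some e := by
            rw [if_pos hg, List.find?_cons]
            split
            · simp_all
            · rw [hf]
          rw [pvScan, hL, pvScan, hR]
          dsimp only
          rw [hdrop_eq]
          rw [ih (cs.drop (e.1.length - 1)).length (by rw [← hn]; simp) _ rfl]
      · -- head char can start no pattern: both sides copy it
        have hL : (if c = 'l' ∨ c = 'c' ∨ c = 'b'
            then T.find? (fun e => e.1.isPrefixOf (c :: replC p r cs)) else none) = none := by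
          rw [if_neg hg]
        have hR : (if c = 'l' ∨ c = 'c' ∨ c = 'b'
            then ((p, r) :: T).find? (fun e => e.1.isPrefixOf (c :: cs)) else none) = none := by
          rw [if_neg hg]
        rw [pvScan, hL, pvScan, hR]
        dsimp only
        rw [ih cs.length (by rw [← hn]; simp) cs rfl]

theorem pvScan_nil_table : ∀ s : List Char, pvScan [] s = s := by
  intro s
  induction s with
  | nil => simp [pvScan]
  | cons c cs ih =>
    rw [pvScan]
    have : (if c = 'l' ∨ c = 'c' ∨ c = 'b'
        then ([] : List (List Char × List Char)).find? (fun e => e.1.isPrefixOf (c :: cs)) else none) = none := by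
      split <;> rfl
    rw [this, ih]

theorem pvFoldScan {P : List Char} (L : List (List Char × List Char))
    (w : ∀ e ∈ L, pvEnt P e) (hni : ∀ e ∈ L, ∀ e' ∈ L, pvNoInterf e.2 e'.1) :
    ∀ s, L.foldl (fun s e => replC e.1 e.2 s) s = pvScan L s := by
  induction L with
  | nil => intro s; rw [List.foldl_nil, pvScan_nil_table]
  | cons e L2 ih =>
    intro s
    rw [List.foldl_cons]
    rw [ih (fun e' he' => w e' (List.mem_cons_of_mem e he'))
        (fun a ha b hb => hni a (List.mem_cons_of_mem e ha) b (List.mem_cons_of_mem e hb))]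
    have hkey := pvKey2 (P := P) e.1 e.2 L2 (by simpa using w e List.mem_cons_self)
      (fun e' he' => w e' (List.mem_cons_of_mem e he'))
      (fun e' he' => hni e List.mem_cons_self e' (List.mem_cons_of_mem e he'))
    rw [hkey s]

theorem pvScan_congr {P : List Char} {T1 T2 : List (List Char × List Char)}
    (w1 : ∀ e ∈ T1, pvEnt P e) (w2 : ∀ e ∈ T2, pvEnt P e) (hmem : ∀ e, e ∈ T1 ↔ e ∈ T2) :
    ∀ s, pvScan T1 s = pvScan T2 s := by
  intro s
  induction hn : s.length using Nat.strong_induction_on generalizing s with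
  | _ n ih =>
  cases s with
  | nil => simp [pvScan]
  | cons c cs =>
    have hfind := pvFind_eq (s := c :: cs) w1 w2 hmem
    by_cases hg : c = 'l' ∨ c = 'c' ∨ c = 'b'
    · cases hf : T1.find? (fun e => e.1.isPrefixOf (c :: cs)) with
      | none =>
        have h1 : (if c = 'l' ∨ c = 'c' ∨ c = 'b'
            then T1.find? (fun e => e.1.isPrefixOf (c :: cs)) else none) = none := by rw [if_pos hg, hf]
        have h2 : (if c = 'l' ∨ c = 'c' ∨ c = 'b'
            then T2.find? (fun e => e.1.isPrefixOf (c :: cs)) else none) = none := by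
          rw [if_pos hg, ← hfind, hf]
        rw [pvScan, h1, pvScan, h2]
        rw [ih cs.length (by rw [← hn]; simp) cs rfl]
      | some e =>
        have h1 : (if c = 'l' ∨ c = 'c' ∨ c = 'b'
            then T1.find? (fun e => e.1.isPrefixOf (c :: cs)) else none) = some e := by rw [if_pos hg, hf]
        have h2 : (if c = 'l' ∨ c = 'c' ∨ c = 'b'
            then T2.find? (fun e => e.1.isPrefixOf (c :: cs)) else none) = some e := by
          rw [if_pos hg, ← hfind, hf]
        rw [pvScan, h1, pvScan, h2]
        dsimp only
        rw [ih (cs.drop (e.1.length - 1)).length (by rw [← hn]; simp) _ rfl]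
    · have h1 : (if c = 'l' ∨ c = 'c' ∨ c = 'b'
          then T1.find? (fun e => e.1.isPrefixOf (c :: cs)) else none) = none := by rw [if_neg hg]
      have h2 : (if c = 'l' ∨ c = 'c' ∨ c = 'b'
          then T2.find? (fun e => e.1.isPrefixOf (c :: cs)) else none) = none := by rw [if_neg hg]
      rw [pvScan, h1, pvScan, h2]
      rw [ih cs.length (by rw [← hn]; simp) cs rfl]

-- restructuring the two ports onto the char level
def pvPairsOf (P : List Char) (cols : List (List Char)) : List (List Char × List Char) :=
  cols.flatMap (fun col => pvPrefC.map (fun pre => (pre ++ col, pre ++ P)))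

def pvColsA : List (List Char) :=
  ["#2980B9".toList, "#2980B9".toList, "#4A90E2".toList, "#2E5F8D".toList,
   "#2980B9".toList, "#2980B9".toList, "#2980B9".toList, "#2980B9".toList,
   "#8E44AD".toList, "#3498DB".toList, "#2980B9".toList, "#2C3E50".toList,
   "#34495E".toList, "#2980B9".toList]

theorem strUpper_eq_iff (a b : String) :
    (PySem.Str.upper a = PySem.Str.upper b) ↔ PySem.Chars.upper a.toList = PySem.Chars.upper b.toList := by
  constructor
  · intro h
    have := congrArg String.toList h
    simpa [PySem.Str.upper] using this
  · intro h
    apply String.toList_inj.mp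
    simpa [PySem.Str.upper] using h

theorem flatMap_if_filter {α β : Type} (l : List α) (p : α → Bool) (f : α → List β) :
    l.flatMap (fun c => if p c then f c else []) = (l.filter p).flatMap f := by
  induction l with
  | nil => rfl
  | cons a t ih =>
    by_cases h : p a <;> simp [h, ih]

-- the six replacements of A's loop body, on char lists
def charStepA (P S : List Char) (s old : List Char) : List Char :=
  if pvActive P S old then
    replC ("border-left: 5px solid ".toList ++ old) ("border-left: 5px solid ".toList ++ P)
      (replC ("border-top: 4px solid ".toList ++ old) ("border-top: 4px solid ".toList ++ P)
        (replC ("border-left: 4px solid ".toList ++ old) ("border-left: 4px solid ".toList ++ P)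
          (replC ("background: ".toList ++ old) ("background: ".toList ++ P)
            (replC ("color: ".toList ++ old) ("color: ".toList ++ P)
              (replC ("linear-gradient(135deg, ".toList ++ old) ("linear-gradient(135deg, ".toList ++ P) s)))))
  else s

theorem charStepA_eq_foldl (P S s old : List Char) :
    charStepA P S s old = if pvActive P S old then
      (pvPrefC.map (fun pre => (pre ++ old, pre ++ P))).foldl (fun s e => replC e.1 e.2 s) s
    else s := rfl

theorem pvActive_false_iff (primary secondary old : String) :
    (PySem.Str.upper old = PySem.Str.upper primary ∨ PySem.Str.upper old = PySem.Str.upper secondary)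
      ↔ pvActive primary.toList secondary.toList old.toList = false := by
  rw [strUpper_eq_iff, strUpper_eq_iff]
  simp [pvActive]
  tauto

theorem portA_chars (content primary secondary : String) :
    (fix_all_colors content primary secondary).toList
      = (pvPairsOf primary.toList (pvColsA.filter (pvActive primary.toList secondary.toList))).foldl
          (fun s e => replC e.1 e.2 s) content.toList := by
  unfold fix_all_colors
  rw [← List.foldl_hom String.toList
    (g₂ := fun (x : List Char) (old : String) => charStepA primary.toList secondary.toList x old.toList)
    (fun (x : String) (old : String) => ?hstep)]
  case hstep =>
    by_cases hcond : PySem.Str.upper old = PySem.Str.upper primary ∨ PySem.Str.upper old = PySem.Str.upper secondary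
    · rw [if_pos hcond]
      have hact := (pvActive_false_iff primary secondary old).mp hcond
      simp only [charStepA]
      rw [if_neg (by simp [hact])]
    · rw [if_neg hcond]
      have hact : pvActive primary.toList secondary.toList old.toList = true := by
        rcases Bool.eq_false_or_eq_true (pvActive primary.toList secondary.toList old.toList) with h | h
        · exact h
        · exact absurd ((pvActive_false_iff primary secondary old).mpr h) hcond
      simp only [charStepA]
      rw [if_pos hact]
      simp only [PySem.Str.replace, String.toList_ofList, String.toList_append]
      rw [replC_eq_replace _ _ _ (by simp : ("linear-gradient(135deg, ".toList ++ old.toList) ≠ [])]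
      rw [replC_eq_replace _ _ _ (by simp : ("color: ".toList ++ old.toList) ≠ [])]
      rw [replC_eq_replace _ _ _ (by simp : ("background: ".toList ++ old.toList) ≠ [])]
      rw [replC_eq_replace _ _ _ (by simp : ("border-left: 4px solid ".toList ++ old.toList) ≠ [])]
      rw [replC_eq_replace _ _ _ (by simp : ("border-top: 4px solid ".toList ++ old.toList) ≠ [])]
      rw [replC_eq_replace _ _ _ (by simp : ("border-left: 5px solid ".toList ++ old.toList) ≠ [])]
  · -- now a char-level fold over the string color list
    have hmapA : pvColsA = ["#2980B9", "#2980B9", "#4A90E2", "#2E5F8D", "#2980B9", "#2980B9",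
        "#2980B9", "#2980B9", "#8E44AD", "#3498DB", "#2980B9", "#2C3E50", "#34495E",
        "#2980B9"].map String.toList := by decide
    rw [show (fun (x : List Char) (old : String) => charStepA primary.toList secondary.toList x old.toList)
          = (fun (x : List Char) (old : String) => charStepA primary.toList secondary.toList x old.toList) from rfl]
    rw [← List.foldl_map (f := String.toList)
      (g := fun (x : List Char) (oldL : List Char) => charStepA primary.toList secondary.toList x oldL), ← hmapA]
    -- split off the skip test as a filter
    have hbody : (fun (x : List Char) (oldL : List Char) => charStepA primary.toList secondary.toList x oldL)
        = (fun x y => if pvActive primary.toList secondary.toList y then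
            (pvPrefC.map (fun pre => (pre ++ y, pre ++ primary.toList))).foldl (fun s e => replC e.1 e.2 s) x
          else x) := by
      funext x y
      exact charStepA_eq_foldl _ _ x y
    rw [hbody, ← List.foldl_filter]
    rw [pvPairsOf, List.foldl_flatMap]

theorem tableB_eq (primary secondary : String) :
    (((["#2980B9", "#4A90E2", "#2E5F8D", "#8E44AD", "#3498DB", "#2C3E50", "#34495E"] : List String).foldl
        (fun table color =>
          if PySem.Str.upper color = PySem.Str.upper primary ∨ PySem.Str.upper color = PySem.Str.upper secondary then
            table
          else
            (["linear-gradient(135deg, ", "color: ", "background: ",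
              "border-left: 4px solid ", "border-top: 4px solid ", "border-left: 5px solid "] : List String).foldl
              (fun t pre => t ++ [(pre ++ color, pre ++ primary)]) table) []).map
        (fun e => (e.1.toList, e.2.toList)))
      = pvPairsOf primary.toList (pvColC.filter (pvActive primary.toList secondary.toList)) := by
  have hbody : (fun (table : List (String × String)) (color : String) =>
        if PySem.Str.upper color = PySem.Str.upper primary ∨ PySem.Str.upper color = PySem.Str.upper secondary then
          table
        else
          (["linear-gradient(135deg, ", "color: ", "background: ",
            "border-left: 4px solid ", "border-top: 4px solid ", "border-left: 5px solid "] : List String).foldl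
            (fun t pre => t ++ [(pre ++ color, pre ++ primary)]) table)
      = (fun (table : List (String × String)) (color : String) =>
          table ++ (if pvActive primary.toList secondary.toList color.toList then
            (["linear-gradient(135deg, ", "color: ", "background: ",
              "border-left: 4px solid ", "border-top: 4px solid ", "border-left: 5px solid "] : List String).map
              (fun pre => (pre ++ color, pre ++ primary))
          else [])) := by
    funext table color
    by_cases hcond : PySem.Str.upper color = PySem.Str.upper primary ∨ PySem.Str.upper color = PySem.Str.upper secondary
    · have hact := (pvActive_false_iff primary secondary color).mp hcond
      rw [if_pos hcond, hact]
      simp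
    · have hact : pvActive primary.toList secondary.toList color.toList = true := by
        rcases Bool.eq_false_or_eq_true (pvActive primary.toList secondary.toList color.toList) with h | h
        · exact h
        · exact absurd ((pvActive_false_iff primary secondary color).mpr h) hcond
      rw [if_neg hcond, hact]
      rw [PySem.List.foldl_append_singleton_eq_map]
      simp
  rw [hbody, PySem.List.foldl_append_eq_flatMap, List.nil_append, List.map_flatMap]
  have hstep : ∀ color : String,
      ((if pvActive primary.toList secondary.toList color.toList then
          (["linear-gradient(135deg, ", "color: ", "background: ",
            "border-left: 4px solid ", "border-top: 4px solid ", "border-left: 5px solid "] : List String).map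
            (fun pre => (pre ++ color, pre ++ primary))
        else []).map (fun e => (e.1.toList, e.2.toList)))
      = (if pvActive primary.toList secondary.toList color.toList then
          pvPrefC.map (fun pre => (pre ++ color.toList, pre ++ primary.toList))
        else []) := by
    intro color
    by_cases hact : pvActive primary.toList secondary.toList color.toList = true
    · rw [if_pos hact, if_pos hact]
      have hpref : pvPrefC = (["linear-gradient(135deg, ", "color: ", "background: ",
          "border-left: 4px solid ", "border-top: 4px solid ", "border-left: 5px solid "] : List String).map
            String.toList := by decide
      rw [hpref, List.map_map, List.map_map]
      apply List.map_congr_left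
      intro pre _
      simp [String.toList_append]
    · rw [if_neg hact, if_neg hact]
      rfl
  rw [funext hstep]
  have hcols : (["#2980B9", "#4A90E2", "#2E5F8D", "#8E44AD", "#3498DB", "#2C3E50", "#34495E"] :
      List String).map String.toList = pvColC := by decide
  rw [← List.flatMap_map String.toList
      (fun colorL => if pvActive primary.toList secondary.toList colorL then
        pvPrefC.map (fun pre => (pre ++ colorL, pre ++ primary.toList)) else []),
    hcols, flatMap_if_filter]
  rfl

theorem portB_chars (content primary secondary : String) :
    (fix_all_colors_alt content primary secondary).toList
      = pvScan (pvPairsOf primary.toList (pvColC.filter (pvActive primary.toList secondary.toList)))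
          content.toList := by
  unfold fix_all_colors_alt
  simp only [String.toList_ofList]
  rw [tableB_eq]

theorem mem_pvPairsOf {P : List Char} {cols : List (List Char)} {e : List Char × List Char} :
    e ∈ pvPairsOf P cols ↔ ∃ col ∈ cols, ∃ pre ∈ pvPrefC, e = (pre ++ col, pre ++ P) := by
  simp [pvPairsOf, List.mem_flatMap, List.mem_map]
  tauto

-- ===== VERDICT (by name: the statement is the Claim_ definition above) =====
-- when no pattern occurs in the text both programs leave it unchanged
theorem replC_id {p r : List Char} : ∀ s : List Char, ¬ p <:+: s → replC p r s = s := by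
  intro s
  induction s with
  | nil => intro _; rw [replC]
  | cons c cs ih =>
    intro hno
    rw [replC]
    have hnp : ¬ p.isPrefixOf (c :: cs) = true := by
      intro hx
      exact hno (List.isPrefixOf_iff_prefix.mp hx).isInfix
    rw [if_neg hnp, ih (fun hx => hno (List.infix_cons hx))]
theorem pvScan_id {T : List (List Char × List Char)} : ∀ s : List Char,
    (∀ e ∈ T, ¬ e.1 <:+: s) → pvScan T s = s := by
  intro s
  induction s with
  | nil => simp [pvScan]
  | cons c cs ih =>
    intro hno
    rw [pvScan]
    have hfind : (if c = 'l' ∨ c = 'c' ∨ c = 'b'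
        then T.find? (fun e => e.1.isPrefixOf (c :: cs)) else none) = none := by
      split
      · apply List.find?_eq_none.mpr
        intro e he
        simp only [Bool.not_eq_true]
        rcases Bool.eq_false_or_eq_true (e.1.isPrefixOf (c :: cs)) with h | h
        · exact absurd (List.isPrefixOf_iff_prefix.mp h).isInfix (hno e he)
        · exact h
      · rfl
    rw [hfind, ih (fun e he hx => hno e he (List.infix_cons hx))]
theorem foldl_replC_id {L : List (List Char × List Char)} {s : List Char}
    (hno : ∀ e ∈ L, ¬ e.1 <:+: s) : L.foldl (fun s e => replC e.1 e.2 s) s = s := by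
  induction L with
  | nil => rfl
  | cons e L2 ih =>
    rw [List.foldl_cons, replC_id s (hno e List.mem_cons_self)]
    exact ih (fun e' he' => hno e' (List.mem_cons_of_mem e he'))

theorem colsA_sub : ∀ c ∈ pvColsA, c ∈ pvColC := by decide
theorem colsC_sub : ∀ c ∈ pvColC, c ∈ pvColsA := by decide

theorem fix_all_colors_spec : Claim_equal_fix_all_colors := by
  intro content primary secondary _ hpre0
  unfold Spec_fix_all_colors
  apply String.toList_inj.mp
  rw [portA_chars, portB_chars]
  rcases hpre0 with hpre | hnopat
  case inr =>
    -- no pattern occurs in the content: both sides leave it unchanged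
    have hnoA : ∀ e ∈ pvPairsOf primary.toList (pvColsA.filter (pvActive primary.toList secondary.toList)),
        ¬ e.1 <:+: content.toList := by
      intro e he
      obtain ⟨col, hcol, pre, hp1, rfl⟩ := mem_pvPairsOf.mp he
      exact hnopat pre hp1 col (colsA_sub col (List.mem_filter.mp hcol).1)
    have hnoB : ∀ e ∈ pvPairsOf primary.toList (pvColC.filter (pvActive primary.toList secondary.toList)),
        ¬ e.1 <:+: content.toList := by
      intro e he
      obtain ⟨col, hcol, pre, hp1, rfl⟩ := mem_pvPairsOf.mp he
      exact hnopat pre hp1 col (List.mem_filter.mp hcol).1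
    rw [foldl_replC_id hnoA, pvScan_id content.toList hnoB]
  have wA : ∀ e ∈ pvPairsOf primary.toList (pvColsA.filter (pvActive primary.toList secondary.toList)),
      pvEnt primary.toList e := by
    intro e he
    obtain ⟨col, hcol, pre, hp1, rfl⟩ := mem_pvPairsOf.mp he
    exact ⟨pre, hp1, col, colsA_sub col (List.mem_filter.mp hcol).1, rfl⟩
  have wB : ∀ e ∈ pvPairsOf primary.toList (pvColC.filter (pvActive primary.toList secondary.toList)),
      pvEnt primary.toList e := by
    intro e he
    obtain ⟨col, hcol, pre, hp1, rfl⟩ := mem_pvPairsOf.mp he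
    exact ⟨pre, hp1, col, (List.mem_filter.mp hcol).1, rfl⟩
  have hniA : ∀ e ∈ pvPairsOf primary.toList (pvColsA.filter (pvActive primary.toList secondary.toList)),
      ∀ e' ∈ pvPairsOf primary.toList (pvColsA.filter (pvActive primary.toList secondary.toList)),
      pvNoInterf e.2 e'.1 := by
    intro e he e' he'
    obtain ⟨col, hcol, pre, hp1, rfl⟩ := mem_pvPairsOf.mp he
    obtain ⟨col', hcol', pre', hp2, rfl⟩ := mem_pvPairsOf.mp he'
    apply hpre pre hp1 pre' hp2 col'
    rw [List.mem_filter]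
    exact ⟨colsA_sub col' (List.mem_filter.mp hcol').1, (List.mem_filter.mp hcol').2⟩
  rw [pvFoldScan (P := primary.toList) _ wA hniA]
  apply pvScan_congr wA wB
  intro e
  rw [mem_pvPairsOf, mem_pvPairsOf]
  constructor
  · rintro ⟨col, hcol, pre, hp1, rfl⟩
    refine ⟨col, ?_, pre, hp1, rfl⟩
    rw [List.mem_filter] at hcol ⊢
    exact ⟨colsA_sub col hcol.1, hcol.2⟩
  · rintro ⟨col, hcol, pre, hp1, rfl⟩
    refine ⟨col, ?_, pre, hp1, rfl⟩
    rw [List.mem_filter] at hcol ⊢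
    exact ⟨colsC_sub col hcol.1, hcol.2⟩
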